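-- pv_equiv track=rewrite | github.com/woo-nny/project_python | KYC/algorithm/Stack/StackPractice7.py | solution
-- ===== SOURCE A (Python) =====
-- def solution(ind_stack,TM): # 전체 토너먼트 대진을 다 만들어주는 코드
--     while True:
--         a = TM[-1]
--         mid = []
--         for i in a:
--             if (i[1] - i[0]) > 1:
--                 mid.append([i[0],(i[0]+i[1])//2])
--                 mid.append([(i[0]+i[1])//2+1,i[1]])
--         TM.append(mid)
--         if TM[-1] == []:
--             TM.pop(-1)
--             break
--     return TM
-- ===== SOURCE B (Python) =====
-- def solution(ind_stack, TM):
--     # Recursive divide-and-conquer: build each root interval's subtree as a list of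
--     # per-depth levels, merge subtrees level-wise, and extend TM with the result.
--     def merge(x, y):
--         if not x:
--             return y
--         if not y:
--             return x
--         return [x[0] + y[0]] + merge(x[1:], y[1:])
--
--     def levels(lo, hi):
--         if hi - lo <= 1:
--             return []
--         m = (lo + hi) // 2
--         return [[[lo, m], [m + 1, hi]]] + merge(levels(lo, m), levels(m + 1, hi))
--
--     acc = []
--     for i in TM[-1]:
--         acc = merge(acc, levels(i[0], i[1]))
--     TM.extend(acc)
--     return TM
-- ===== Notes on version B (the rewrite author's own statement) =====
-- stated objective: alternative
-- what changed: The iterative level-by-level while loop over TM's growing tail is replaced by a recursive divide-and-conquer that builds each root interval's subtree as a list of per-depth levels and merges the subtrees level-wise, extending TM once at the end.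
import Mathlib
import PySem

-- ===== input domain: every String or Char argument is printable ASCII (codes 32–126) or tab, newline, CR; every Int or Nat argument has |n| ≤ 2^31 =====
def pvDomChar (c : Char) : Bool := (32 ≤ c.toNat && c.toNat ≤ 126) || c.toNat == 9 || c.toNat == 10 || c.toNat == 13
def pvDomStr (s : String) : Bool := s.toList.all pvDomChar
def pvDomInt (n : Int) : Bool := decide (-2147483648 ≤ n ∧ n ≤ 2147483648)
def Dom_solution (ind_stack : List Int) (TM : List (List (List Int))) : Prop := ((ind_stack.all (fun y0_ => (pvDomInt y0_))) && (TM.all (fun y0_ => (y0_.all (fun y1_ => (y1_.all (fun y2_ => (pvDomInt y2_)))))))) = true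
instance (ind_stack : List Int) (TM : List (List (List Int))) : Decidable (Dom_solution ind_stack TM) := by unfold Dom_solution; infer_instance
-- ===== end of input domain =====

-- B replaces A's iterative level-by-level while loop with a recursive divide-and-conquer
-- that builds each root interval's subtree as a list of per-depth levels and merges the
-- subtrees level-wise (objective: alternative decomposition, same cost).
-- Both A and B mutate TM in place by appending the new levels; the mutation is identical,
-- and the theorems below are about the return value.

-- ===== PORT A =====
-- i[k] for an in-range index (Pre_solution guarantees the indices A uses are in range;
-- on an out-of-range index Python raises IndexError, which Pre_solution excludes).
def pvGetI (i : List Int) (k : Int) : Int := (PySem.List.pyGet? i k).getD 0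

-- one pass of A's while-loop body: build `mid` from the current last level `a`
def pvStepA (a : List (List Int)) : List (List Int) :=
  a.foldl (fun mid i =>
    if pvGetI i 1 - pvGetI i 0 > 1 then
      mid ++ [[pvGetI i 0, PySem.Int.floordiv (pvGetI i 0 + pvGetI i 1) 2],
              [PySem.Int.floordiv (pvGetI i 0 + pvGetI i 1) 2 + 1, pvGetI i 1]]
    else mid) []

-- termination measure for the while loop: total interval width of the level
def pvW (i : List Int) : Nat := (pvGetI i 1 - pvGetI i 0).toNat
def pvSumW (a : List (List Int)) : Nat := (a.map pvW).sum

theorem pvMidBounds (lo hi : Int) (h : 1 < hi - lo) :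
    lo ≤ PySem.Int.floordiv (lo + hi) 2 ∧ PySem.Int.floordiv (lo + hi) 2 < hi := by
  have h2 := (PySem.Int.floordiv_eq_iff_of_pos (a := lo + hi) (b := 2)
      (q := PySem.Int.floordiv (lo + hi) 2) (by norm_num)).mp rfl
  omega

theorem pvStepA_flatMap (a : List (List Int)) :
    pvStepA a = a.flatMap (fun i =>
      if pvGetI i 1 - pvGetI i 0 > 1 then
        [[pvGetI i 0, PySem.Int.floordiv (pvGetI i 0 + pvGetI i 1) 2],
         [PySem.Int.floordiv (pvGetI i 0 + pvGetI i 1) 2 + 1, pvGetI i 1]]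
      else []) := by
  unfold pvStepA
  have hf : (fun (mid : List (List Int)) (i : List Int) =>
      if pvGetI i 1 - pvGetI i 0 > 1 then
        mid ++ [[pvGetI i 0, PySem.Int.floordiv (pvGetI i 0 + pvGetI i 1) 2],
                [PySem.Int.floordiv (pvGetI i 0 + pvGetI i 1) 2 + 1, pvGetI i 1]]
      else mid)
      = fun mid i => mid ++ (if pvGetI i 1 - pvGetI i 0 > 1 then
        [[pvGetI i 0, PySem.Int.floordiv (pvGetI i 0 + pvGetI i 1) 2],
         [PySem.Int.floordiv (pvGetI i 0 + pvGetI i 1) 2 + 1, pvGetI i 1]]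
      else []) := by
    funext mid i; split <;> simp
  rw [hf, PySem.List.foldl_append_eq_flatMap]; simp

theorem pvGetI_pair_0 (x y : Int) : pvGetI [x, y] 0 = x := by
  simp [pvGetI, PySem.List.pyGet?, PySem.List.pyIdx?]

theorem pvGetI_pair_1 (x y : Int) : pvGetI [x, y] 1 = y := by
  simp [pvGetI, PySem.List.pyGet?, PySem.List.pyIdx?]

theorem pvW_pair (x y : Int) : pvW [x, y] = (y - x).toNat := by
  simp [pvW, pvGetI_pair_0, pvGetI_pair_1]

theorem pvSumW_cons (i : List Int) (a : List (List Int)) :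
    pvSumW (i :: a) = pvW i + pvSumW a := by simp [pvSumW]

theorem pvSumW_append (x y : List (List Int)) :
    pvSumW (x ++ y) = pvSumW x + pvSumW y := by simp [pvSumW]

theorem pvStepA_decr (a : List (List Int)) (h : pvStepA a ≠ []) :
    pvSumW (pvStepA a) < pvSumW a := by
  rw [pvStepA_flatMap] at h ⊢
  have hle : ∀ (b : List (List Int)), pvSumW (b.flatMap (fun i =>
      if pvGetI i 1 - pvGetI i 0 > 1 then
        [[pvGetI i 0, PySem.Int.floordiv (pvGetI i 0 + pvGetI i 1) 2],
         [PySem.Int.floordiv (pvGetI i 0 + pvGetI i 1) 2 + 1, pvGetI i 1]]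
      else [])) ≤ pvSumW b := by
    intro b
    induction b with
    | nil => simp [pvSumW]
    | cons j restb ihb =>
      rw [List.flatMap_cons, pvSumW_append, pvSumW_cons]
      have hj : pvSumW (if pvGetI j 1 - pvGetI j 0 > 1 then
          [[pvGetI j 0, PySem.Int.floordiv (pvGetI j 0 + pvGetI j 1) 2],
           [PySem.Int.floordiv (pvGetI j 0 + pvGetI j 1) 2 + 1, pvGetI j 1]]
        else []) ≤ pvW j := by
        split
        · rename_i hcj
          have hb := pvMidBounds (pvGetI j 0) (pvGetI j 1) hcj
          have hwj : pvW j = (pvGetI j 1 - pvGetI j 0).toNat := rfl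
          simp only [pvSumW, List.map_cons, List.map_nil, List.sum_cons, List.sum_nil, pvW_pair]
          omega
        · simp [pvSumW]
      omega
  induction a with
  | nil => simp at h
  | cons i rest ih =>
    rw [List.flatMap_cons, pvSumW_append, pvSumW_cons]
    by_cases hc : pvGetI i 1 - pvGetI i 0 > 1
    · have hb := pvMidBounds (pvGetI i 0) (pvGetI i 1) hc
      have hwi : pvW i = (pvGetI i 1 - pvGetI i 0).toNat := rfl
      have hstrict : pvSumW (if pvGetI i 1 - pvGetI i 0 > 1 then
          [[pvGetI i 0, PySem.Int.floordiv (pvGetI i 0 + pvGetI i 1) 2],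
           [PySem.Int.floordiv (pvGetI i 0 + pvGetI i 1) 2 + 1, pvGetI i 1]]
        else []) < pvW i := by
        rw [if_pos hc]
        simp only [pvSumW, List.map_cons, List.map_nil, List.sum_cons, List.sum_nil, pvW_pair]
        omega
      have := hle rest
      omega
    · rw [List.flatMap_cons, if_neg hc, List.nil_append] at h
      have := ih h
      rw [if_neg hc]
      have h0 : pvSumW ([] : List (List Int)) = 0 := rfl
      omega

-- A's while loop, starting from the current last level `a`: the list of the non-empty
-- levels it appends to TM (the final empty level is popped again, so it never appears).
def pvLoopA (a : List (List Int)) : List (List (List Int)) :=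
  if h : pvStepA a = [] then [] else pvStepA a :: pvLoopA (pvStepA a)
termination_by pvSumW a
decreasing_by exact pvStepA_decr a h

-- A only ever appends whole levels to TM (and pops the final empty one), so the loop is
-- ported as TM ++ <levels generated from TM[-1]>.
def solution (ind_stack : List Int) (TM : List (List (List Int))) : List (List (List Int)) :=
  TM ++ pvLoopA ((PySem.List.pyGet? TM (-1)).getD [])

-- ===== PORT B =====
-- merge two level-lists index-by-index (Source B's recursive `merge`)
def pvMerge : List (List (List Int)) → List (List (List Int)) → List (List (List Int))
  | [], ys => ys
  | xs, [] => xs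
  | x :: xs, y :: ys => (x ++ y) :: pvMerge xs ys

-- Source B's `levels`: the per-depth descendant levels of the interval [lo, hi]
def pvLevels (lo hi : Int) : List (List (List Int)) :=
  if h : hi - lo ≤ 1 then []
  else
    [[lo, PySem.Int.floordiv (lo + hi) 2], [PySem.Int.floordiv (lo + hi) 2 + 1, hi]] ::
      pvMerge (pvLevels lo (PySem.Int.floordiv (lo + hi) 2))
        (pvLevels (PySem.Int.floordiv (lo + hi) 2 + 1) hi)
termination_by (hi - lo).toNat
decreasing_by
  · have := pvMidBounds lo hi (by omega)
    omega
  · have := pvMidBounds lo hi (by omega)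
    omega

def solution_alt (ind_stack : List Int) (TM : List (List (List Int))) : List (List (List Int)) :=
  TM ++ ((PySem.List.pyGet? TM (-1)).getD []).foldl
      (fun acc i => pvMerge acc (pvLevels (pvGetI i 0) (pvGetI i 1))) []

-- ===== PRECONDITION & SPEC =====
-- Pre_ excludes exactly the inputs on which Python A raises: an empty TM (TM[-1] is an
-- IndexError) and a last level containing an interval with fewer than two entries
-- (i[0]/i[1] is an IndexError).
def Pre_solution (ind_stack : List Int) (TM : List (List (List Int))) : Prop :=
  TM ≠ [] ∧ ∀ i ∈ (TM.getLast?).getD [], 2 ≤ i.length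
instance (ind_stack : List Int) (TM : List (List (List Int))) : Decidable (Pre_solution ind_stack TM) := by
  unfold Pre_solution; infer_instance
def pvWitness_solution : List Int × List (List (List Int)) := ([], [[[1, 4]]])

def Spec_solution (ind_stack : List Int) (TM : List (List (List Int))) (out : List (List (List Int))) : Prop := out = solution_alt ind_stack TM
instance (ind_stack : List Int) (TM : List (List (List Int))) (out : List (List (List Int))) : Decidable (Spec_solution ind_stack TM out) := by unfold Spec_solution; infer_instance

-- ===== CLAIM (what is proved, stated in full; the proofs are below) =====
def Claim_equal_solution : Prop := ∀ (ind_stack : List Int) (TM : List (List (List Int))), Dom_solution ind_stack TM → Pre_solution ind_stack TM → Spec_solution ind_stack TM (solution ind_stack TM)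

-- ===== LEMMAS AND PROOFS =====
-- the two children of an interval (empty when it does not split)
def pvChild (i : List Int) : List (List Int) :=
  if pvGetI i 1 - pvGetI i 0 > 1 then
    [[pvGetI i 0, PySem.Int.floordiv (pvGetI i 0 + pvGetI i 1) 2],
     [PySem.Int.floordiv (pvGetI i 0 + pvGetI i 1) 2 + 1, pvGetI i 1]]
  else []

def pvSub (i : List Int) : List (List (List Int)) := pvLevels (pvGetI i 0) (pvGetI i 1)

-- level-wise merge of the subtrees of all intervals of a level
def pvM (a : List (List Int)) : List (List (List Int)) := (a.map pvSub).foldr pvMerge []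

theorem pvStepA_eq (a : List (List Int)) : pvStepA a = a.flatMap pvChild := by
  rw [pvStepA_flatMap]; rfl

theorem pvMerge_nil_right (x : List (List (List Int))) : pvMerge x [] = x := by
  cases x <;> rfl

theorem pvMerge_assoc (x y z : List (List (List Int))) :
    pvMerge (pvMerge x y) z = pvMerge x (pvMerge y z) := by
  induction x generalizing y z with
  | nil => rfl
  | cons a xs ih =>
    cases y with
    | nil => rfl
    | cons b ys =>
      cases z with
      | nil => simp [pvMerge_nil_right]
      | cons c zs => simp [pvMerge, ih, List.append_assoc]

theorem pvM_append (xs ys : List (List Int)) :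
    pvM (xs ++ ys) = pvMerge (pvM xs) (pvM ys) := by
  induction xs with
  | nil => rfl
  | cons x rest ih => simp [pvM, List.foldr_cons, pvMerge_assoc] at ih ⊢; rw [ih]

-- per-root structural lemma: a subtree is its children level followed by the merged
-- subtrees of the children
theorem pvSub_eq (i : List Int) :
    pvSub i = if pvChild i = [] then [] else pvChild i :: pvM (pvChild i) := by
  unfold pvSub pvChild
  by_cases hc : pvGetI i 1 - pvGetI i 0 > 1
  · rw [pvLevels]
    simp only [hc, if_pos]
    rw [dif_neg (by omega)]
    have h0 : pvGetI [pvGetI i 0, PySem.Int.floordiv (pvGetI i 0 + pvGetI i 1) 2] 0 = pvGetI i 0 := by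
      simp [pvGetI, PySem.List.pyGet?, PySem.List.pyIdx?]
    simp [pvM, pvSub, pvMerge_nil_right, pvGetI, PySem.List.pyGet?, PySem.List.pyIdx?]
  · rw [pvLevels, dif_pos (by omega)]
    simp [hc]

theorem pvM_step (a : List (List Int)) :
    pvM a = if a.flatMap pvChild = [] then [] else
      a.flatMap pvChild :: pvM (a.flatMap pvChild) := by
  induction a with
  | nil => simp [pvM]
  | cons i rest ih =>
    have hM : pvM (i :: rest) = pvMerge (pvSub i) (pvM rest) := by simp [pvM]
    rw [List.flatMap_cons, hM, pvSub_eq, ih]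
    by_cases hc : pvChild i = []
    · rw [if_pos hc, hc, List.nil_append]
      by_cases hr : rest.flatMap pvChild = []
      · rw [if_pos hr]; rfl
      · rw [if_neg hr]; rfl
    · rw [if_neg hc]
      by_cases hr : rest.flatMap pvChild = []
      · rw [if_pos hr, hr, List.append_nil, pvMerge_nil_right, if_neg hc]
      · rw [if_neg hr]
        have hne : pvChild i ++ rest.flatMap pvChild ≠ [] := by simp [hc]
        rw [if_neg hne]
        cases hchild : pvChild i with
        | nil => exact absurd hchild hc
        | cons c cs =>
          cases hrest : rest.flatMap pvChild with
          | nil => exact absurd hrest hr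
          | cons d ds =>
            simp only [pvMerge, ← hchild, ← hrest]
            rw [pvM_append]

theorem pvLoopA_eq_pvM (a : List (List Int)) : pvLoopA a = pvM a := by
  induction a using pvLoopA.induct with
  | case1 a h => rw [pvLoopA, dif_pos h, pvM_step, ← pvStepA_eq, h, if_pos rfl]
  | case2 a h ih =>
    rw [pvLoopA, dif_neg h, pvM_step, ← pvStepA_eq, if_neg h, ih, pvStepA_eq]

theorem pvFoldl_merge (a : List (List Int)) (acc : List (List (List Int))) :
    a.foldl (fun acc i => pvMerge acc (pvLevels (pvGetI i 0) (pvGetI i 1))) acc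
      = pvMerge acc (pvM a) := by
  induction a generalizing acc with
  | nil => simp [pvM, pvMerge_nil_right]
  | cons i rest ih =>
    simp only [List.foldl_cons, ih, pvM]
    rw [List.map_cons, List.foldr_cons, ← pvMerge_assoc]
    rfl

-- ===== VERDICT (by name: the statement is the Claim_ definition above) =====
theorem solution_spec : Claim_equal_solution := by
  intro ind_stack TM _ _
  unfold Spec_solution solution solution_alt
  rw [pvFoldl_merge, pvLoopA_eq_pvM]
  rfl
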